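-- pv_equiv track=rewrite | github.com/pear96/TIL | Python/PAlgo/카카오기출/후보키.py | uniqueness
-- ===== SOURCE A (Python) =====
-- def uniqueness(cols, relation, total_row):
--     rows = set()
--
--     for rel in relation:
--         row = ""
--         for col in cols:
--             row += str(rel[col])  # 행을 문자열로 만든다.
--         rows.add(row)
--
--     return True if len(rows) == total_row else False
-- ===== SOURCE B (Python) =====
-- def uniqueness(cols, relation, total_row):
--     keys = []
--     for rel in relation:
--         row = ""
--         for c in cols:
--             row += str(rel[c])
--         keys.append(row)
--     keys.sort()
--     distinct = 0
--     prev = None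
--     for k in keys:
--         if k != prev:
--             distinct += 1
--         prev = k
--     return distinct == total_row
-- ===== Notes on version B (the rewrite author's own statement) =====
-- stated objective: alternative
-- what changed: replaces the hash-set of row keys by collecting the keys into a list, sorting it, and counting distinct keys in one adjacent-comparison scan
import Mathlib
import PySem

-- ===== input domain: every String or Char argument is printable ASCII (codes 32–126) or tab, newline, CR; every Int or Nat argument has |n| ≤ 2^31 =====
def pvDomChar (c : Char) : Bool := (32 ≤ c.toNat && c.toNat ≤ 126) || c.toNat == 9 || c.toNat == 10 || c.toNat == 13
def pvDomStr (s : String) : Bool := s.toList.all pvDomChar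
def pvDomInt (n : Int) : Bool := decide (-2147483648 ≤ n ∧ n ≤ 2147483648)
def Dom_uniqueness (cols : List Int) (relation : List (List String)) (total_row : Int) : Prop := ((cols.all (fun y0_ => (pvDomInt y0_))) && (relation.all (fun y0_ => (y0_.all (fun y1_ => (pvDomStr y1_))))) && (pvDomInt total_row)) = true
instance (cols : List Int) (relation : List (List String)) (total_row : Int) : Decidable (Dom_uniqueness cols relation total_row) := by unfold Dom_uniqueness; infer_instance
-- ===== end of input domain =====

-- B replaces A's hash-set of row keys by sort-then-adjacent-scan distinct counting; alternative decomposition, same results.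


-- ===== PORT A =====
-- 'row += str(rel[col])': rel[col] is already a string, so str(...) is the identity;
-- pyGetD is exact for rel[col] under Pre_ (every index in range).
def uniqueness (cols : List Int) (relation : List (List String)) (total_row : Int) : Bool :=
  let rows : PySem.Set String :=
    relation.foldl (fun rows rel =>
      PySem.Set.add rows (cols.foldl (fun row col => row ++ PySem.List.pyGetD rel col "") ""))
      PySem.Set.empty
  decide ((rows.length : Int) = total_row)

-- ===== PORT B =====
def uniqueness_alt (cols : List Int) (relation : List (List String)) (total_row : Int) : Bool :=
  let keys : List String :=
    relation.foldl (fun keys rel =>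
      keys ++ [cols.foldl (fun row c => row ++ PySem.List.pyGetD rel c "") ""]) []
  let ks := PySem.List.sorted keys (fun x => x) false
  let st : Int × Option String :=
    ks.foldl (fun st k => ((if st.2 ≠ some k then st.1 + 1 else st.1), some k)) (0, none)
  decide (st.1 = total_row)

-- ===== PRECONDITION & SPEC =====
-- Pre_ excludes exactly the inputs where Python A raises IndexError: some rel[col] out of range.
def Pre_uniqueness (cols : List Int) (relation : List (List String)) (total_row : Int) : Prop :=
  ∀ rel ∈ relation, ∀ col ∈ cols, PySem.Raise.InRange rel.length col
instance (cols : List Int) (relation : List (List String)) (total_row : Int) : Decidable (Pre_uniqueness cols relation total_row) := by unfold Pre_uniqueness; infer_instance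

def pvWitness_uniqueness : List Int × List (List String) × Int :=
  ([0, 1], [["a", "b"], ["a", "c"]], 2)

def Spec_uniqueness (cols : List Int) (relation : List (List String)) (total_row : Int) (out : Bool) : Prop := out = uniqueness_alt cols relation total_row
instance (cols : List Int) (relation : List (List String)) (total_row : Int) (out : Bool) : Decidable (Spec_uniqueness cols relation total_row out) := by unfold Spec_uniqueness; infer_instance

-- ===== CLAIM (what is proved, stated in full; the proofs are below) =====
def Claim_equal_uniqueness : Prop := ∀ (cols : List Int) (relation : List (List String)) (total_row : Int), Dom_uniqueness cols relation total_row → Pre_uniqueness cols relation total_row → Spec_uniqueness cols relation total_row (uniqueness cols relation total_row)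

-- ===== LEMMAS AND PROOFS =====

-- B's scan over a ≤-sorted tail with 'prev = some p' a lower bound of the tail:
-- it adds the number of distinct elements other than p.
lemma pv_scan_some {α : Type} [LinearOrder α] (l : List α) :
    ∀ (n : Int) (p : α), l.Pairwise (· ≤ ·) → (∀ x ∈ l, p ≤ x) →
      (l.foldl (fun (st : Int × Option α) k => ((if st.2 ≠ some k then st.1 + 1 else st.1), some k)) (n, some p)).1
        = n + ((l.toFinset.erase p).card : Int) := by
  induction l with
  | nil => intro n p _ _; simp
  | cons k t ih =>
    intro n p hpw hlb
    rcases List.pairwise_cons.mp hpw with ⟨hk, ht⟩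
    rw [List.foldl_cons]
    by_cases hpk : p = k
    · subst hpk
      have hstep : ((if ((n, some p) : Int × Option α).2 ≠ some p then (n, some p).1 + 1 else (n, some p).1, some p) : Int × Option α) = (n, some p) := by simp
      rw [hstep, ih n p ht hk, List.toFinset_cons, Finset.erase_insert_eq_erase]
    · have hstep : ((if ((n, some p) : Int × Option α).2 ≠ some k then (n, some p).1 + 1 else (n, some p).1, some k) : Int × Option α) = (n + 1, some k) := by simp [hpk]
      rw [hstep, ih (n + 1) k ht hk]
      have hpnot : p ∉ (k :: t).toFinset := by
        simp only [List.toFinset_cons, Finset.mem_insert, List.mem_toFinset]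
        rintro (h | h)
        · exact hpk h
        · exact hpk (le_antisymm (hlb k (List.mem_cons_self)) (hk p h))
      rw [Finset.erase_eq_of_notMem hpnot, List.toFinset_cons]
      by_cases hkt : k ∈ t.toFinset
      · rw [Finset.card_insert_of_mem hkt, ← Finset.card_erase_add_one hkt]
        push_cast; ring
      · rw [Finset.erase_eq_of_notMem hkt, Finset.card_insert_of_notMem hkt]
        push_cast; ring

-- B's whole scan from (0, None) over a ≤-sorted list counts the distinct elements.
lemma pv_scan_none {α : Type} [LinearOrder α] (l : List α) (h : l.Pairwise (· ≤ ·)) :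
    (l.foldl (fun (st : Int × Option α) k => ((if st.2 ≠ some k then st.1 + 1 else st.1), some k)) (0, none)).1
      = (l.toFinset.card : Int) := by
  cases l with
  | nil => simp
  | cons k t =>
    rcases List.pairwise_cons.mp h with ⟨hk, ht⟩
    rw [List.foldl_cons]
    have hstep : ((if (((0 : Int), (none : Option α)) : Int × Option α).2 ≠ some k then ((0 : Int), (none : Option α)).1 + 1 else ((0 : Int), (none : Option α)).1, some k) : Int × Option α) = (1, some k) := by simp
    rw [hstep, pv_scan_some t 1 k ht hk, List.toFinset_cons]
    by_cases hkt : k ∈ t.toFinset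
    · rw [Finset.card_insert_of_mem hkt, ← Finset.card_erase_add_one hkt]
      push_cast; ring
    · rw [Finset.erase_eq_of_notMem hkt, Finset.card_insert_of_notMem hkt]
      push_cast; ring

-- A's set size and B's sorted-scan count both equal the number of distinct keys.
lemma pv_counts_eq (K : List String) :
    (((PySem.Set.ofList K).length : Int)) =
      ((PySem.List.sorted K (fun x => x) false).foldl
        (fun (st : Int × Option String) k => ((if st.2 ≠ some k then st.1 + 1 else st.1), some k)) (0, none)).1 := by
  have hpw : (PySem.List.sorted K (fun x => x) false).Pairwise (· ≤ ·) := by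
    simpa using PySem.List.sorted_pairwise K (fun x => x)
  rw [pv_scan_none _ hpw, List.toFinset_eq_of_perm _ _ (PySem.List.sorted_perm K (fun x => x) false)]
  have h1 : (PySem.Set.ofList K).toFinset = K.toFinset := by
    ext x; simp [PySem.Set.mem_ofList]
  rw [← h1, List.toFinset_card_of_nodup (PySem.Set.nodup_ofList K)]

-- ===== VERDICT (by name: the statement is the Claim_ definition above) =====
theorem uniqueness_spec : Claim_equal_uniqueness := by
  intro cols relation total_row _ _
  unfold Spec_uniqueness
  simp only [uniqueness, uniqueness_alt]
  rw [← PySem.Set.update_map_eq_foldl_add, PySem.Set.update_empty,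
      PySem.List.foldl_append_singleton_eq_map, List.nil_append, pv_counts_eq]
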